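-- pv_equiv track=rewrite | github.com/hieunguyen7337/Combined_Phosphorylation_Dataset | Unified_Phosphorylation_Dataset/src/phosphorylation_dataset/audit_labeling.py | latest_decisions
-- ===== SOURCE A (Python) =====
-- from typing import Iterable
--
-- def latest_decisions(decisions: Iterable[dict]) -> dict[str, dict]:
--     """Return the latest non-superseded decision for each candidate."""
--     by_candidate: dict[str, list[dict]] = {}
--     superseded: set[str] = set()
--
--     for decision in decisions:
--         decision_id = str(decision.get("decision_id", ""))
--         supersedes = decision.get("supersedes_decision_id")
--         if supersedes:
--             superseded.add(str(supersedes))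
--         if decision_id:
--             by_candidate.setdefault(str(decision.get("candidate_id", "")), []).append(decision)
--
--     latest: dict[str, dict] = {}
--     for cid, candidate_decisions in by_candidate.items():
--         active = [
--             decision
--             for decision in candidate_decisions
--             if str(decision.get("decision_id", "")) not in superseded
--         ]
--         if not active:
--             continue
--         latest[cid] = sorted(active, key=lambda item: str(item.get("timestamp", "")))[-1]
--     return latest
-- ===== SOURCE B (Python) =====
-- def latest_decisions(decisions):
--     """Return the latest non-superseded decision for each candidate.
--
--     Two streaming passes, no per-candidate grouping table and no sorting:
--     pass 1 collects the superseded ids, pass 2 keeps one running 'best so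
--     far' per candidate (>= so the last timestamp tie wins).
--     """
--     decisions = list(decisions)
--
--     superseded = set()
--     for decision in decisions:
--         supersedes = decision.get("supersedes_decision_id")
--         if supersedes:
--             superseded.add(str(supersedes))
--
--     best = {}
--     for decision in decisions:
--         decision_id = str(decision.get("decision_id", ""))
--         if not decision_id:
--             continue
--         cid = str(decision.get("candidate_id", ""))
--         if decision_id in superseded:
--             best.setdefault(cid, None)
--         else:
--             cur = best.get(cid)
--             if cur is None or str(cur.get("timestamp", "")) <= str(decision.get("timestamp", "")):
--                 best[cid] = decision
--
--     return {cid: d for cid, d in best.items() if d is not None}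
-- ===== Notes on version B (the rewrite author's own statement) =====
-- stated objective: alternative
-- what changed: A groups all decisions into a per-candidate dict of lists and then, per candidate, filters and stably sorts the list by timestamp to take the last element; B never builds the grouping table: it streams the decisions twice, first collecting the superseded id set, then keeping a single running best-so-far decision per candidate (>= on the timestamp so the last tie wins), so the per-candidate lists and the sort disappear.
import Mathlib
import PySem

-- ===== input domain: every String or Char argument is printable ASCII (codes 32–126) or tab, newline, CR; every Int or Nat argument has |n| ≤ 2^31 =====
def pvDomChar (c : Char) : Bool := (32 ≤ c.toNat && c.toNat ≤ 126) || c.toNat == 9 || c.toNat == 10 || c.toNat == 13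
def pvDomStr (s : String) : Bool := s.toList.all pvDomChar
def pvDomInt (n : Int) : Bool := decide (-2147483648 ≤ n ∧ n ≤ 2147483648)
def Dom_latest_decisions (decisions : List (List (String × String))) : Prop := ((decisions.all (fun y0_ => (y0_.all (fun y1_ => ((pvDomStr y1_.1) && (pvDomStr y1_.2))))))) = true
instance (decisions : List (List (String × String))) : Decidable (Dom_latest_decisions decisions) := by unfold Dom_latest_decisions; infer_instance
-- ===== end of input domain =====

-- B replaces A's group-then-sort-then-pick pipeline by two streaming passes (a superseded set,
-- then one running best-so-far per candidate); the return values are proved equal below.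

-- ===== PORT A =====
-- each decision arrives as an association list; Python sees it as a dict, built here once per decision
def pvDictA (d : List (String × String)) : PySem.Dict String String := PySem.Dict.ofList d

-- 'supersedes = decision.get("supersedes_decision_id"); if supersedes: superseded.add(str(supersedes))'
-- (values are strings, so str(supersedes) is supersedes itself; the empty string is falsy)
def pvSupStepA (sup : PySem.Set String) (d : List (String × String)) : PySem.Set String :=
  match (pvDictA d).get? "supersedes_decision_id" with
  | some s => if s = "" then sup else PySem.Set.add sup s
  | none => sup

-- 'if decision_id: by_candidate.setdefault(str(candidate_id), []).append(decision)'
-- (setdefault-then-append is exactly Dict.modify with default [])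
def pvBycStepA (byc : PySem.Dict String (List (PySem.Dict String String)))
    (d : List (String × String)) : PySem.Dict String (List (PySem.Dict String String)) :=
  if (pvDictA d).getD "decision_id" "" ≠ "" then
    byc.modify ((pvDictA d).getD "candidate_id" "") [] (· ++ [pvDictA d])
  else byc

def latest_decisions (decisions : List (List (String × String))) : List (String × List (String × String)) :=
  -- first loop: one pass, two accumulators (by_candidate, superseded)
  let st := decisions.foldl (fun st d => (pvBycStepA st.1 d, pvSupStepA st.2 d))
      ((PySem.Dict.empty : PySem.Dict String (List (PySem.Dict String String))),
       (PySem.Set.empty : PySem.Set String))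
  -- second loop: 'for cid, candidate_decisions in by_candidate.items(): …'
  let latest := st.1.items.foldl (fun latest p =>
      let active : List (PySem.Dict String String) := p.2.filter (fun dd => !(PySem.Set.contains st.2 (dd.getD "decision_id" "")))
      if active = [] then latest   -- 'if not active: continue'
      else latest.insert p.1
        (PySem.List.pyGetD
          (PySem.List.sorted active (fun dd => dd.getD "timestamp" "") false) (-1)
          PySem.Dict.empty))       -- 'sorted(active, key=…)[-1]' (active ≠ [] here, so [-1] never raises)
    (PySem.Dict.empty : PySem.Dict String (PySem.Dict String String))
  latest.items.map (fun p => (p.1, p.2.items))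

-- ===== PORT B =====
def pvDictB (d : List (String × String)) : PySem.Dict String String := PySem.Dict.ofList d

-- pass 1: 'if supersedes: superseded.add(str(supersedes))'
def pvSupStepB (sup : PySem.Set String) (d : List (String × String)) : PySem.Set String :=
  match (pvDictB d).get? "supersedes_decision_id" with
  | some s => if s = "" then sup else PySem.Set.add sup s
  | none => sup

-- pass 2 body: keep one running best decision per candidate
def pvBestStepB (sup : PySem.Set String)
    (best : PySem.Dict String (Option (PySem.Dict String String)))
    (d : List (String × String)) : PySem.Dict String (Option (PySem.Dict String String)) :=
  let dd := pvDictB d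
  let did := dd.getD "decision_id" ""
  if did = "" then best                                      -- 'if not decision_id: continue'
  else
    let cid := dd.getD "candidate_id" ""
    if PySem.Set.contains sup did then best.setdefault cid none
    else
      match best.getD cid none with                          -- 'cur = best.get(cid)'
      | none => best.insert cid (some dd)
      | some cur =>
        if cur.getD "timestamp" "" ≤ dd.getD "timestamp" "" then best.insert cid (some dd)
        else best

def latest_decisions_alt (decisions : List (List (String × String))) : List (String × List (String × String)) :=
  let superseded := decisions.foldl pvSupStepB (PySem.Set.empty : PySem.Set String)
  let best := decisions.foldl (pvBestStepB superseded)
      (PySem.Dict.empty : PySem.Dict String (Option (PySem.Dict String String)))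
  -- '{cid: d for cid, d in best.items() if d is not None}' — best's keys are distinct,
  -- so the comprehension's items are exactly this filterMap
  best.items.filterMap (fun p => p.2.map (fun dd => (p.1, dd.items)))

-- ===== PRECONDITION & SPEC =====
def Spec_latest_decisions (decisions : List (List (String × String))) (out : List (String × List (String × String))) : Prop := out = latest_decisions_alt decisions
instance (decisions : List (List (String × String))) (out : List (String × List (String × String))) : Decidable (Spec_latest_decisions decisions out) := by unfold Spec_latest_decisions; infer_instance

-- ===== CLAIM (what is proved, stated in full; the proofs are below) =====
def Claim_equal_latest_decisions : Prop := ∀ (decisions : List (List (String × String))), Dom_latest_decisions decisions → Spec_latest_decisions decisions (latest_decisions decisions)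

-- ===== LEMMAS AND PROOFS =====

-- proof-side abbreviations
def pvDid (dd : PySem.Dict String String) : String := dd.getD "decision_id" ""
def pvCand (dd : PySem.Dict String String) : String := dd.getD "candidate_id" ""
def pvTs (dd : PySem.Dict String String) : String := dd.getD "timestamp" ""

-- the stream both programs effectively process: the decision dicts with a non-empty decision_id
def pvDs (decisions : List (List (String × String))) : List (PySem.Dict String String) :=
  (decisions.map PySem.Dict.ofList).filter (fun dd => decide (¬ pvDid dd = ""))

def pvSup (decisions : List (List (String × String))) : PySem.Set String :=
  decisions.foldl pvSupStepB PySem.Set.empty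

def pvGroup (ds : List (PySem.Dict String String)) (c : String) : List (PySem.Dict String String) :=
  ds.filter (fun dd => pvCand dd == c)

def pvActive (sup : PySem.Set String) (cds : List (PySem.Dict String String)) :
    List (PySem.Dict String String) :=
  cds.filter (fun dd => !(PySem.Set.contains sup (pvDid dd)))

-- B's per-candidate reduction step (non-superseded case)
def pvG (o : Option (PySem.Dict String String)) (dd : PySem.Dict String String) :
    Option (PySem.Dict String String) :=
  match o with
  | none => some dd
  | some cur => if pvTs cur ≤ pvTs dd then some dd else some cur

def pvF (sup : PySem.Set String) (o : Option (PySem.Dict String String))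
    (dd : PySem.Dict String String) : Option (PySem.Dict String String) :=
  if PySem.Set.contains sup (pvDid dd) then o else pvG o dd

-- A's per-candidate value: last element of the stable sort of the active decisions
def pvVal (sup : PySem.Set String) (cds : List (PySem.Dict String String)) : PySem.Dict String String :=
  PySem.List.pyGetD (PySem.List.sorted (pvActive sup cds) pvTs false) (-1) PySem.Dict.empty

-- the common normal form both outputs are reduced to
def pvOut (decisions : List (List (String × String))) : List (String × List (String × String)) :=
  (PySem.Set.ofList ((pvDs decisions).map pvCand)).filterMap (fun c =>
    ((PySem.List.sorted (pvActive (pvSup decisions) (pvGroup (pvDs decisions) c)) pvTs false).getLast?).map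
      (fun dd => (c, dd.items)))

-- a 'continue'-shaped fold (Bool test) is a fold over the filtered list
theorem pv_foldl_skip {α β : Type} (p : α → Bool) (f : β → α → β) :
    ∀ (l : List α) (init : β),
      l.foldl (fun acc x => if p x then acc else f acc x) init
        = (l.filter (fun x => !p x)).foldl f init := by
  intro l
  induction l with
  | nil => intro init; rfl
  | cons x t ih =>
    intro init
    by_cases h : p x = true <;> simp [h, ih]

-- the same, for a Prop test
theorem pv_foldl_skip_ite {α β : Type} (p : α → Prop) [DecidablePred p] (f : β → α → β) :
    ∀ (l : List α) (init : β),
      l.foldl (fun acc x => if p x then acc else f acc x) init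
        = (l.filter (fun x => decide (¬ p x))).foldl f init := by
  intro l
  induction l with
  | nil => intro init; rfl
  | cons x t ih =>
    intro init
    by_cases h : p x <;> simp [h, ih]

-- a Dict insert of the value already stored is the identity (keys unique)
theorem pv_insert_getD_self {ν : Type} (d : PySem.Dict String ν) (k : String) (dflt : ν)
    (hn : d.keys.Nodup) (hc : d.contains k = true) : d.insert k (d.getD k dflt) = d := by
  apply PySem.Dict.ext
  rw [PySem.Dict.items_insert_of_contains _ _ hc]
  have h1 : ∀ p ∈ d.items, (if p.1 == k then (k, d.getD k dflt) else p) = p := by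
    intro p hp
    by_cases h : p.1 = k
    · have hm : (p.1, p.2) ∈ d.items := by simpa using hp
      have hv : d.getD p.1 dflt = p.2 := PySem.Dict.getD_of_mem_items d hm hn dflt
      subst h
      simp [hv]
    · simp [h]
  rw [List.map_congr_left h1]
  simp

-- B's setdefault/insert steps are a single Dict.modify with pvF
theorem pv_best_eq_modifyfold (sup : PySem.Set String) :
    ∀ (ds : List (PySem.Dict String String)) (d : PySem.Dict String (Option (PySem.Dict String String))),
      d.keys.Nodup →
      ds.foldl (fun best dd =>
          if PySem.Set.contains sup (pvDid dd) then best.setdefault (pvCand dd) none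
          else match best.getD (pvCand dd) none with
            | none => best.insert (pvCand dd) (some dd)
            | some cur => if pvTs cur ≤ pvTs dd then best.insert (pvCand dd) (some dd) else best) d
        = ds.foldl (fun best dd => best.modify (pvCand dd) none (fun o => pvF sup o dd)) d := by
  intro ds
  induction ds with
  | nil => intro d _; rfl
  | cons dd t ih =>
    intro d hn
    have hstep :
        (if PySem.Set.contains sup (pvDid dd) then d.setdefault (pvCand dd) none
          else match d.getD (pvCand dd) none with
            | none => d.insert (pvCand dd) (some dd)
            | some cur => if pvTs cur ≤ pvTs dd then d.insert (pvCand dd) (some dd) else d)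
        = d.modify (pvCand dd) none (fun o => pvF sup o dd) := by
      unfold PySem.Dict.modify pvF
      by_cases hs : PySem.Set.contains sup (pvDid dd) = true
      · simp only [hs, if_pos]
        by_cases hc : d.contains (pvCand dd) = true
        · rw [PySem.Dict.setdefault_of_contains _ _ hc, pv_insert_getD_self _ _ _ hn hc]
        · rw [PySem.Dict.setdefault_of_not_contains _ _ (by simpa using hc),
              PySem.Dict.getD_of_not_contains _ _ (by simpa using hc)]
      · simp only [hs, if_neg, Bool.false_eq_true, not_false_iff]
        cases hg : d.getD (pvCand dd) none with
        | none => simp [pvG]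
        | some cur =>
          simp only [pvG]
          by_cases ht : pvTs cur ≤ pvTs dd
          · simp [ht]
          · simp only [ht, if_neg, not_false_iff]
            have hc : d.contains (pvCand dd) = true := by
              have hq : d.get? (pvCand dd) = some (some cur) := by
                rw [PySem.Dict.getD_eq_get?_getD] at hg
                cases h : d.get? (pvCand dd) with
                | none => rw [h] at hg; simp at hg
                | some o => rw [h] at hg; simp at hg; rw [hg]
              rw [PySem.Dict.contains_eq_isSome_get?, hq]; rfl
            have hins := pv_insert_getD_self d (pvCand dd) none hn hc
            rw [hg] at hins
            exact hins.symm
    rw [List.foldl_cons, List.foldl_cons, hstep]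
    apply ih
    unfold PySem.Dict.modify
    exact PySem.Dict.nodup_keys_insert _ _ _ hn

-- the value a modify-fold leaves at one key is the fold over that key's group
theorem pv_getD_modifyfold {ν : Type} (key : PySem.Dict String String → String)
    (F : ν → PySem.Dict String String → ν) :
    ∀ (ds : List (PySem.Dict String String)) (d : PySem.Dict String ν) (dflt : ν) (c : String),
      (ds.foldl (fun d dd => d.modify (key dd) dflt (fun o => F o dd)) d).getD c dflt
        = (ds.filter (fun dd => key dd == c)).foldl F (d.getD c dflt) := by
  intro ds
  induction ds with
  | nil => intro d dflt c; rfl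
  | cons dd t ih =>
    intro d dflt c
    rw [List.foldl_cons, ih, List.filter_cons]
    by_cases h : key dd = c
    · simp only [h, beq_self_eq_true, if_pos, List.foldl_cons]
      rw [← h, PySem.Dict.getD_modify]
      simp
    · have hb : (key dd == c) = false := by simpa using h
      simp only [hb, Bool.false_eq_true, if_neg, not_false_iff]
      rw [PySem.Dict.getD_modify]
      have : c ≠ key dd := fun hh => h hh.symm
      simp [this]

-- items of a conditional-insert fold over distinct fresh keys
theorem pv_items_condinsert {ν : Type} (Q : String → Prop) [DecidablePred Q] (V : String → ν) :
    ∀ (ks : List String) (d : PySem.Dict String ν),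
      ks.Nodup → (∀ c ∈ ks, d.contains c = false) →
      (ks.foldl (fun lat c => if Q c then lat else lat.insert c (V c)) d).items
        = d.items ++ (ks.filter (fun c => !decide (Q c))).map (fun c => (c, V c)) := by
  intro ks
  induction ks with
  | nil => intro d _ _; simp
  | cons c t ih =>
    intro d hnd hc
    have hct : ∀ c' ∈ t, d.contains c' = false := fun c' h => hc c' (List.mem_cons_of_mem _ h)
    rw [List.foldl_cons, List.filter_cons]
    by_cases hq : Q c
    · simp only [hq, if_pos, decide_true, Bool.not_true, Bool.false_eq_true, if_neg,
        not_false_iff]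
      exact ih d hnd.of_cons hct
    · simp only [hq, if_neg, not_false_iff, decide_false, Bool.not_false, if_pos]
      have hcc : d.contains c = false := hc c List.mem_cons_self
      have hfresh : ∀ c' ∈ t, (d.insert c (V c)).contains c' = false := by
        intro c' h
        rw [PySem.Dict.contains_insert]
        have : c' ≠ c := fun hh => (List.nodup_cons.mp hnd).1 (hh ▸ h)
        simp [this, hct c' h]
      rw [ih (d.insert c (V c)) hnd.of_cons hfresh,
        PySem.Dict.items_insert_of_not_contains _ _ hcc]
      simp

theorem pv_getLast?_cons_of_ne_nil {α : Type} (a : α) (l : List α) (h : l ≠ []) :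
    (a :: l).getLast? = l.getLast? := by
  cases l with
  | nil => simp at h
  | cons b t => simp [List.getLast?_cons_cons]

-- getLast? of a stable insert: x lands at the end iff nothing in ys must come after x
theorem pv_insertBy_getLast? {α : Type} (b : α → α → Bool) (x : α) :
    ∀ ys : List α, (PySem.List.insertBy b x ys).getLast? = if ys.any (b x) then ys.getLast? else some x := by
  intro ys
  induction ys with
  | nil => simp [PySem.List.insertBy]
  | cons y t ih =>
    by_cases hby : b x y = true
    · simp [PySem.List.insertBy, hby, List.getLast?_cons_cons]
    · have hne : PySem.List.insertBy b x t ≠ [] := by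
        cases t <;> simp [PySem.List.insertBy] <;> split <;> simp
      simp only [PySem.List.insertBy, hby, Bool.false_eq_true, if_neg, not_false_iff,
        List.any_cons]
      rw [pv_getLast?_cons_of_ne_nil _ _ hne, ih]
      by_cases ha : t.any (b x) = true
      · have htne : t ≠ [] := by rintro rfl; simp at ha
        rw [if_pos ha, if_pos (by simp [ha]), pv_getLast?_cons_of_ne_nil _ _ htne]
      · simp [ha]

-- the last element of a ≤-pairwise list is maximal
theorem pv_pairwise_le_getLast {α : Type} (key : α → String) :
    ∀ (l : List α) (m : α), l.Pairwise (fun a b => key a ≤ key b) → l.getLast? = some m →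
      ∀ y ∈ l, key y ≤ key m := by
  intro l m hp hl y hy
  rcases List.getLast?_eq_some_iff.mp hl with ⟨l', rfl⟩
  rcases List.mem_append.mp hy with h | h
  · exact (List.pairwise_append.mp hp).2.2 y h m (List.mem_singleton_self m)
  · rw [List.mem_singleton.mp h]

-- B's running best over a list = last element of A's stable sort of it (≥ keeps the last tie)
theorem pv_g_sorted :
    ∀ xs : List (PySem.Dict String String),
      xs.foldl pvG none = (PySem.List.sorted xs pvTs false).getLast? := by
  intro xs
  induction xs using List.reverseRecOn with
  | nil => rfl
  | append_singleton t x ih =>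
    rw [List.foldl_append, List.foldl_cons, List.foldl_nil,
      PySem.List.sorted_eq_foldl_insertBy, List.foldl_append, List.foldl_cons, List.foldl_nil,
      ← PySem.List.sorted_eq_foldl_insertBy,
      pv_insertBy_getLast?]
    cases hl : (PySem.List.sorted t pvTs false).getLast? with
    | none =>
      have : PySem.List.sorted t pvTs false = [] := List.getLast?_eq_none_iff.mp hl
      rw [ih, hl, this]
      simp [pvG]
    | some m =>
      rw [ih, hl]
      have hmax : ∀ y ∈ PySem.List.sorted t pvTs false, pvTs y ≤ pvTs m :=
        pv_pairwise_le_getLast pvTs _ m (PySem.List.sorted_pairwise t pvTs) hl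
      have hmem : m ∈ PySem.List.sorted t pvTs false := by
        rcases List.getLast?_eq_some_iff.mp hl with ⟨l', hl'⟩
        rw [hl']; exact List.mem_append.mpr (Or.inr (List.mem_singleton_self m))
      by_cases hlt : pvTs x < pvTs m
      · have hany : (PySem.List.sorted t pvTs false).any (fun y => decide (pvTs x < pvTs y)) = true :=
          List.any_eq_true.mpr ⟨m, hmem, by simpa using hlt⟩
        rw [if_pos hany]
        simp only [pvG]
        rw [if_neg (not_le.mpr hlt)]
      · have hany : (PySem.List.sorted t pvTs false).any (fun y => decide (pvTs x < pvTs y)) = false := by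
          rw [List.any_eq_false]
          intro y hy
          simp only [decide_eq_true_eq]
          exact fun hxy => hlt (lt_of_lt_of_le hxy (hmax y hy))
        rw [if_neg (by rw [hany]; exact Bool.false_ne_true)]
        simp only [pvG]
        rw [if_pos (not_lt.mp hlt)]

-- per candidate: B's reduction = last of the stable sort of the active decisions
theorem pv_core (sup : PySem.Set String) (cds : List (PySem.Dict String String)) :
    cds.foldl (pvF sup) none = (PySem.List.sorted (pvActive sup cds) pvTs false).getLast? := by
  have h : cds.foldl (pvF sup) none
      = cds.foldl (fun acc dd => if PySem.Set.contains sup (pvDid dd) then acc else pvG acc dd) none := rfl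
  rw [h, pv_foldl_skip, ← pv_g_sorted]
  rfl

-- assembling the two output lists: filter-map (with [-1]) = filterMap (with getLast?)
theorem pv_final (sup : PySem.Set String) (A : String → List (PySem.Dict String String)) :
    ∀ ks : List String,
      (ks.filter (fun c => !decide (pvActive sup (A c) = []))).map
        (fun c => (c, (PySem.List.pyGetD (PySem.List.sorted (pvActive sup (A c)) pvTs false) (-1)
                        PySem.Dict.empty).items))
        = ks.filterMap (fun c =>
            ((PySem.List.sorted (pvActive sup (A c)) pvTs false).getLast?).map
              (fun dd => (c, dd.items))) := by
  intro ks
  induction ks with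
  | nil => rfl
  | cons c t ih =>
    rw [List.filter_cons, List.filterMap_cons]
    by_cases h : pvActive sup (A c) = []
    · simp only [h, decide_true, Bool.not_true, Bool.false_eq_true, if_neg, not_false_iff]
      have h0 : (PySem.List.sorted ([] : List (PySem.Dict String String)) pvTs false) = [] := rfl
      rw [h0]
      simp only [List.getLast?_nil, Option.map_none]
      exact ih
    · have hs : PySem.List.sorted (pvActive sup (A c)) pvTs false ≠ [] := by
        rw [Ne, PySem.List.sorted_eq_nil_iff]; exact h
      have hg : (PySem.List.sorted (pvActive sup (A c)) pvTs false).getLast?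
          = some ((PySem.List.sorted (pvActive sup (A c)) pvTs false).getLast hs) :=
        List.getLast?_eq_some_getLast hs
      simp only [h, decide_false, Bool.not_false, if_pos, List.map_cons, hg, Option.map_some]
      rw [PySem.List.pyGetD_neg_one _ _ hs, ih]

-- A's first loop builds exactly the grouping of the filtered stream
theorem pv_byc_eq (decisions : List (List (String × String))) :
    decisions.foldl pvBycStepA PySem.Dict.empty
      = (pvDs decisions).foldl
          (fun d dd => d.modify (pvCand dd) [] (fun v => v ++ [dd])) PySem.Dict.empty := by
  have h1 : decisions.foldl pvBycStepA PySem.Dict.empty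
      = (decisions.map PySem.Dict.ofList).foldl
          (fun byc dd => if pvDid dd ≠ "" then byc.modify (pvCand dd) [] (fun v => v ++ [dd]) else byc)
          PySem.Dict.empty := by
    rw [List.foldl_map]
    rfl
  rw [h1, PySem.List.foldl_ite_eq_foldl_filter (p := fun dd => pvDid dd ≠ "")]
  unfold pvDs
  simp only [ne_eq]

def pvBycC (decisions : List (List (String × String))) : PySem.Dict String (List (PySem.Dict String String)) :=
  (pvDs decisions).foldl (fun d dd => d.modify (pvCand dd) [] (fun v => v ++ [dd])) PySem.Dict.empty

theorem pv_byc_keys (decisions : List (List (String × String))) :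
    (pvBycC decisions).keys = PySem.Set.ofList ((pvDs decisions).map pvCand) := by
  unfold pvBycC
  rw [PySem.Dict.keys_foldl_modify_key (pvDs decisions) pvCand [] (fun _ dd v => v ++ [dd]),
    PySem.Dict.keys_empty, PySem.Set.update_nil_left]

theorem pv_byc_items (decisions : List (List (String × String))) :
    (pvBycC decisions).items
      = (PySem.Set.ofList ((pvDs decisions).map pvCand)).map (fun c => (c, pvGroup (pvDs decisions) c)) := by
  have hnd : (pvBycC decisions).keys.Nodup := by
    rw [pv_byc_keys]; exact PySem.Set.nodup_ofList _
  rw [PySem.Dict.items_eq_map_keys _ hnd [], pv_byc_keys]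
  refine List.map_congr_left (fun c _ => ?_)
  unfold pvBycC
  rw [pv_getD_modifyfold pvCand (fun v dd => v ++ [dd]), PySem.Dict.getD_empty,
    PySem.List.foldl_append_singleton_eq_self]
  rfl

theorem pv_A (decisions : List (List (String × String))) :
    latest_decisions decisions = pvOut decisions := by
  calc latest_decisions decisions
      = ((pvBycC decisions).items.foldl (fun latest p =>
            if pvActive (pvSup decisions) p.2 = [] then latest
            else latest.insert p.1 (pvVal (pvSup decisions) p.2))
          PySem.Dict.empty).items.map (fun p => (p.1, p.2.items)) := by
        simp only [latest_decisions]
        rw [PySem.List.foldl_prod_mk (f := pvBycStepA) (g := pvSupStepA), pv_byc_eq]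
        rfl
    _ = (((PySem.Set.ofList ((pvDs decisions).map pvCand)).foldl (fun lat c =>
            if pvActive (pvSup decisions) (pvGroup (pvDs decisions) c) = [] then lat
            else lat.insert c (pvVal (pvSup decisions) (pvGroup (pvDs decisions) c)))
          PySem.Dict.empty).items).map (fun p => (p.1, p.2.items)) := by
        rw [pv_byc_items, List.foldl_map]
    _ = (([] : List (String × PySem.Dict String String))
          ++ ((PySem.Set.ofList ((pvDs decisions).map pvCand)).filter (fun c =>
              !decide (pvActive (pvSup decisions) (pvGroup (pvDs decisions) c) = []))).map
            (fun c => (c, pvVal (pvSup decisions) (pvGroup (pvDs decisions) c)))).map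
          (fun p => (p.1, p.2.items)) := by
        exact congrArg (List.map _)
          (pv_items_condinsert (fun c => pvActive (pvSup decisions) (pvGroup (pvDs decisions) c) = [])
            (fun c => pvVal (pvSup decisions) (pvGroup (pvDs decisions) c)) _ _
            (PySem.Set.nodup_ofList _) (fun c _ => PySem.Dict.contains_empty c))
    _ = pvOut decisions := by
        rw [List.nil_append, List.map_map]
        unfold pvOut
        exact pv_final (pvSup decisions) (pvGroup (pvDs decisions)) _

theorem pv_B (decisions : List (List (String × String))) :
    latest_decisions_alt decisions = pvOut decisions := by
  calc latest_decisions_alt decisions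
      = (decisions.foldl (pvBestStepB (pvSup decisions)) PySem.Dict.empty).items.filterMap
          (fun p => p.2.map (fun dd => (p.1, dd.items))) := rfl
    _ = ((decisions.map PySem.Dict.ofList).foldl (fun best dd =>
            if pvDid dd = "" then best
            else
              if PySem.Set.contains (pvSup decisions) (pvDid dd) then best.setdefault (pvCand dd) none
              else match best.getD (pvCand dd) none with
                | none => best.insert (pvCand dd) (some dd)
                | some cur => if pvTs cur ≤ pvTs dd then best.insert (pvCand dd) (some dd) else best)
          PySem.Dict.empty).items.filterMap (fun p => p.2.map (fun dd => (p.1, dd.items))) := by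
        rw [List.foldl_map]
        rfl
    _ = ((pvDs decisions).foldl (fun best dd =>
            if PySem.Set.contains (pvSup decisions) (pvDid dd) then best.setdefault (pvCand dd) none
            else match best.getD (pvCand dd) none with
              | none => best.insert (pvCand dd) (some dd)
              | some cur => if pvTs cur ≤ pvTs dd then best.insert (pvCand dd) (some dd) else best)
          PySem.Dict.empty).items.filterMap (fun p => p.2.map (fun dd => (p.1, dd.items))) := by
        exact congrArg (fun x => (PySem.Dict.items x).filterMap _)
          (pv_foldl_skip_ite (fun dd => pvDid dd = "") _ (decisions.map PySem.Dict.ofList) PySem.Dict.empty)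
    _ = ((pvDs decisions).foldl (fun best dd => best.modify (pvCand dd) none
            (fun o => pvF (pvSup decisions) o dd)) PySem.Dict.empty).items.filterMap
          (fun p => p.2.map (fun dd => (p.1, dd.items))) := by
        exact congrArg (fun x => (PySem.Dict.items x).filterMap _)
          (pv_best_eq_modifyfold (pvSup decisions) (pvDs decisions) _ PySem.Dict.nodup_keys_empty)
    _ = pvOut decisions := by
        have hkeys : ((pvDs decisions).foldl (fun best dd => best.modify (pvCand dd) none
            (fun o => pvF (pvSup decisions) o dd)) PySem.Dict.empty).keys
            = PySem.Set.ofList ((pvDs decisions).map pvCand) := by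
          rw [PySem.Dict.keys_foldl_modify_key (pvDs decisions) pvCand none
              (fun _ dd o => pvF (pvSup decisions) o dd),
            PySem.Dict.keys_empty, PySem.Set.update_nil_left]
        have hnd : ((pvDs decisions).foldl (fun best dd => best.modify (pvCand dd) none
            (fun o => pvF (pvSup decisions) o dd)) PySem.Dict.empty).keys.Nodup := by
          rw [hkeys]; exact PySem.Set.nodup_ofList _
        have hitems : ((pvDs decisions).foldl (fun best dd => best.modify (pvCand dd) none
            (fun o => pvF (pvSup decisions) o dd)) PySem.Dict.empty).items
            = (PySem.Set.ofList ((pvDs decisions).map pvCand)).map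
                (fun c => (c, (PySem.List.sorted (pvActive (pvSup decisions) (pvGroup (pvDs decisions) c)) pvTs false).getLast?)) := by
          rw [PySem.Dict.items_eq_map_keys _ hnd none, hkeys]
          refine List.map_congr_left (fun c _ => ?_)
          rw [pv_getD_modifyfold pvCand (pvF (pvSup decisions)), PySem.Dict.getD_empty, ← pv_core]
          rfl
        rw [hitems, List.filterMap_map]
        rfl

-- ===== VERDICT (by name: the statement is the Claim_ definition above) =====
theorem latest_decisions_spec : Claim_equal_latest_decisions := by
  intro decisions _
  unfold Spec_latest_decisions
  rw [pv_A, pv_B]
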